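-- pv_equiv track=rewrite | github.com/ggicci/fuck-leetcode | leetcode-1048/solution.py | is_predecessor
-- ===== SOURCE A (Python) =====
-- def is_predecessor(word_1: str, word_2: str) -> bool:
--     """Test if word_1 is predecessor of word_2.
--     """
--     if len(word_1) + 1 != len(word_2):
--         return False
--
--     # Find the place where first make the difference.
--     i = 0
--     while i < len(word_1):
--         if word_1[i] != word_2[i]:
--             break
--         i += 1
--     # The remained part should be equal.
--     while i < len(word_1):
--         if word_1[i] != word_2[i + 1]:
--             return False
--         i += 1
--     return True
-- ===== SOURCE B (Python) =====
-- def is_predecessor(word_1: str, word_2: str) -> bool: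
--     """Test if word_1 is predecessor of word_2."""
--     return any(word_1 == word_2[:k] + word_2[k + 1:] for k in range(len(word_2)))
-- ===== Notes on version B (the rewrite author's own statement) =====
-- stated objective: idiomatic
-- what changed: Replaces A's length guard plus two-phase pointer walk with a single any() over deletion positions: word_1 is a predecessor iff it equals word_2 with one character removed.
import Mathlib
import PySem

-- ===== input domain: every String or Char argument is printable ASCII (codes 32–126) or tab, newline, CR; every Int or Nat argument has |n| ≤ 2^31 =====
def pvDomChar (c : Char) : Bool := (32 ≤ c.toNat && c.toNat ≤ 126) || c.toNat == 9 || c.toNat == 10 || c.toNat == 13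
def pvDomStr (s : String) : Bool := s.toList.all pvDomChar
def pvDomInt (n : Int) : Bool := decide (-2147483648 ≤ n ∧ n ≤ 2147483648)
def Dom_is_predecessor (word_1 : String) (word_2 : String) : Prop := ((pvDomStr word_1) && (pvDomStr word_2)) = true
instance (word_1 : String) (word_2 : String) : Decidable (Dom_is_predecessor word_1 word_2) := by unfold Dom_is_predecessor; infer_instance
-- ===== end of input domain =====

-- B replaces A's two-phase pointer walk with an any() over all single-deletion positions of word_2 (idiomatic; no length guard needed).

-- ===== PORT A =====
-- first while loop: advance past the common prefix (state = the remaining suffixes at index i)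
def aSkip : List Char → List Char → List Char × List Char
  | a :: t1, b :: t2 => if a ≠ b then (a :: t1, b :: t2) else aSkip t1 t2
  | l1, l2 => (l1, l2)

-- second while loop: compare word_1[i..] with word_2[i+1..] elementwise
def aCheck : List Char → List Char → Bool
  | [], _ => true
  | a :: t1, b :: t2 => if a ≠ b then false else aCheck t1 t2
  | _ :: _, [] => false  -- unreachable under the length guard (Python would raise IndexError)

def is_predecessor (word_1 : String) (word_2 : String) : Bool :=
  if word_1.toList.length + 1 ≠ word_2.toList.length then false
  else
    let p := aSkip word_1.toList word_2.toList
    aCheck p.1 (p.2.drop 1)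

-- ===== PORT B =====
-- any(word_1 == word_2[:k] + word_2[k+1:] for k in range(len(word_2)))
def is_predecessor_alt (word_1 : String) (word_2 : String) : Bool :=
  (List.range word_2.toList.length).any
    (fun k => word_1.toList == word_2.toList.take k ++ word_2.toList.drop (k + 1))

-- ===== PRECONDITION & SPEC =====
def Spec_is_predecessor (word_1 : String) (word_2 : String) (out : Bool) : Prop := out = is_predecessor_alt word_1 word_2
instance (word_1 : String) (word_2 : String) (out : Bool) : Decidable (Spec_is_predecessor word_1 word_2 out) := by unfold Spec_is_predecessor; infer_instance

-- ===== CLAIM (what is proved, stated in full; the proofs are below) =====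
def Claim_equal_is_predecessor : Prop := ∀ (word_1 : String) (word_2 : String), Dom_is_predecessor word_1 word_2 → Spec_is_predecessor word_1 word_2 (is_predecessor word_1 word_2)

-- ===== LEMMAS AND PROOFS =====

-- l1 arises from l2 by deleting one character
def Del (l1 l2 : List Char) : Prop :=
  ∃ k, k < l2.length ∧ l1 = l2.take k ++ l2.drop (k + 1)

theorem Del_length {l1 l2 : List Char} (h : Del l1 l2) : l1.length + 1 = l2.length := by
  obtain ⟨k, hk, he⟩ := h
  subst he
  simp [List.length_take, List.length_drop]
  omega

theorem aCheck_iff (l1 l2 : List Char) (h : l1.length = l2.length) :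
    aCheck l1 l2 = true ↔ l1 = l2 := by
  induction l1 generalizing l2 with
  | nil =>
    cases l2 with
    | nil => simp [aCheck]
    | cons b t2 => simp at h
  | cons a t1 ih =>
    cases l2 with
    | nil => simp at h
    | cons b t2 =>
      simp only [aCheck]
      split_ifs with hab
      · simp [List.cons.injEq, hab]
      · simp [ih t2 (by simpa using h), List.cons.injEq, not_not.mp (by simpa using hab)]

theorem skipCheck_iff (l1 l2 : List Char) (h : l1.length + 1 = l2.length) :
    aCheck (aSkip l1 l2).1 ((aSkip l1 l2).2.drop 1) = true ↔ Del l1 l2 := by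
  induction l1 generalizing l2 with
  | nil =>
    cases l2 with
    | nil => simp at h
    | cons b t2 =>
      have ht2 : t2 = [] := by
        cases t2 with
        | nil => rfl
        | cons c t => simp at h
      subst ht2
      simp only [aSkip, aCheck, List.drop]
      constructor
      · intro _; exact ⟨0, by simp, by simp⟩
      · intro _; trivial
  | cons a t1 ih =>
    cases l2 with
    | nil => simp at h
    | cons b t2 =>
      have hlen : t1.length + 1 = t2.length := by simpa using h
      by_cases hab : a = b
      · subst hab
        have hskip : aSkip (a :: t1) (a :: t2) = aSkip t1 t2 := by simp [aSkip]
        rw [hskip, ih t2 hlen]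
        constructor
        · rintro ⟨k, hk, he⟩
          exact ⟨k + 1, by simpa using Nat.succ_lt_succ hk, by simp [he]⟩
        · rintro ⟨k, hk, he⟩
          cases k with
          | zero =>
            simp at he
            refine ⟨0, by omega, ?_⟩
            simp [← he]
          | succ j =>
            simp only [List.take_succ_cons, List.drop_succ_cons, List.cons_append,
              List.cons.injEq] at he
            exact ⟨j, by simp at hk; omega, he.2⟩
      · have hskip : aSkip (a :: t1) (b :: t2) = (a :: t1, b :: t2) := by simp [aSkip, hab]
        rw [hskip]
        simp only [List.drop_succ_cons, List.drop_zero]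
        rw [aCheck_iff (a :: t1) t2 (by simpa using hlen)]
        constructor
        · intro he; exact ⟨0, by simp, by simpa using he⟩
        · rintro ⟨k, hk, he⟩
          cases k with
          | zero => simpa using he
          | succ j =>
            simp only [List.take_succ_cons, List.drop_succ_cons, List.cons_append,
              List.cons.injEq] at he
            exact absurd he.1 hab

theorem alt_iff (w1 w2 : String) :
    is_predecessor_alt w1 w2 = true ↔ Del w1.toList w2.toList := by
  simp [is_predecessor_alt, List.any_eq_true, List.mem_range, Del]

-- ===== VERDICT (by name: the statement is the Claim_ definition above) =====
theorem is_predecessor_spec : Claim_equal_is_predecessor := by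
  intro w1 w2 _
  unfold Spec_is_predecessor
  by_cases h : w1.toList.length + 1 = w2.toList.length
  · have hA : is_predecessor w1 w2
        = aCheck (aSkip w1.toList w2.toList).1 ((aSkip w1.toList w2.toList).2.drop 1) := by
      simp only [is_predecessor, if_neg (not_not_intro h)]
    rw [hA, Bool.eq_iff_iff, alt_iff, skipCheck_iff _ _ h]
  · have hA : is_predecessor w1 w2 = false := by simp only [is_predecessor, if_pos h]
    rw [hA]
    symm
    simp only [Bool.eq_false_iff, ne_eq]
    intro hb
    exact h (Del_length ((alt_iff w1 w2).mp hb))
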